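-- pv_equiv track=rewrite | github.com/Lumif-ai/flywheel-v2 | skills/_shared/engines/skill_converter.py | _truncate_long_examples
-- ===== SOURCE A (Python) =====
-- def _truncate_long_examples(body: str, max_lines: int = 20) -> str:
--     """Truncate code blocks longer than max_lines."""
--     lines = body.split("\n")
--     result = []
--     in_code_block = False
--     code_block_lines = []
--     code_fence = ""
--
--     for line in lines:
--         if not in_code_block:
--             if line.strip().startswith("```"):
--                 in_code_block = True
--                 code_fence = line
--                 code_block_lines = [line]
--             else:
--                 result.append(line)
--         else:
--             code_block_lines.append(line)
--             if line.strip().startswith("```") and len(code_block_lines) > 1: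
--                 # End of code block
--                 in_code_block = False
--                 if len(code_block_lines) > max_lines + 2:  # +2 for fences
--                     result.append(code_fence)
--                     result.extend(code_block_lines[1 : max_lines + 1])
--                     result.append("# ... (truncated)")
--                     result.append("```")
--                 else:
--                     result.extend(code_block_lines)
--                 code_block_lines = []
--
--     # Handle unclosed code block
--     if code_block_lines:
--         result.extend(code_block_lines)
--
--     return "\n".join(result)
-- ===== SOURCE B (Python) =====
-- def _truncate_long_examples(body: str, max_lines: int = 20) -> str:
--     """Truncate code blocks longer than max_lines (index/inner-scan version)."""
--     lines = body.split("\n")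
--     result = []
--     i = 0
--     n = len(lines)
--     while i < n:
--         line = lines[i]
--         if line.strip().startswith("```"):
--             # inner scan for the closing fence
--             j = i + 1
--             while j < n and not lines[j].strip().startswith("```"):
--                 j += 1
--             if j == n:
--                 # unclosed block: emit verbatim and stop
--                 result.extend(lines[i:])
--                 i = n
--             else:
--                 block = lines[i:j + 1]
--                 if len(block) > max_lines + 2:
--                     result.append(line)
--                     result.extend(block[1:max_lines + 1])
--                     result.append("# ... (truncated)")
--                     result.append("```")
--                 else:
--                     result.extend(block)
--                 i = j + 1
--         else:
--             result.append(line)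
--             i += 1
--     return "\n".join(result)
-- ===== Notes on version B (the rewrite author's own statement) =====
-- stated objective: alternative
-- what changed: Replaces A's single pass with a boolean in_code_block state flag and an accumulated code_block_lines buffer by an index-driven while loop that, on an opening fence, runs an inner scan forward to the closing fence and emits the (possibly truncated) block at once.
import Mathlib
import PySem

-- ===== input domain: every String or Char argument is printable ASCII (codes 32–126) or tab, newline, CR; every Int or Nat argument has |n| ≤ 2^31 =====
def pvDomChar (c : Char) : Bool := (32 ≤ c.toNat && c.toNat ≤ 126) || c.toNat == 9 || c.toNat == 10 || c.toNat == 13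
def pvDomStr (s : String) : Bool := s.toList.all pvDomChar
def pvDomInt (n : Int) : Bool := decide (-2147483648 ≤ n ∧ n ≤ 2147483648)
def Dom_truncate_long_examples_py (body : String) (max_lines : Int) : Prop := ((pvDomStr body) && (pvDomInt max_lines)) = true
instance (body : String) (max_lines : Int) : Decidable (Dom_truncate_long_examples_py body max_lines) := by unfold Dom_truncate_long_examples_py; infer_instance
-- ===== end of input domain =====

-- B replaces A's state-flag single pass by an index loop with an inner scan to the closing fence; objective: alternative decomposition, same cost.

-- line.strip().startswith("```")
def pvIsFence (l : String) : Bool := PySem.Str.startswith (PySem.Str.strip l) "```"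

-- body.split("\n")  (sep ≠ "", so split? is always some)
def pvSplitNL (body : String) : List String := (PySem.Str.split? body "\n").getD []

-- ===== PORT A =====
-- fold state: (result, in_code_block, code_block_lines, code_fence)
def pvAStep (max_lines : Int) (st : List String × Bool × List String × String)
    (line : String) : List String × Bool × List String × String :=
  let (res, inb, blk, fence) := st
  if !inb then
    if pvIsFence line then (res, true, [line], line)
    else (res ++ [line], inb, blk, fence)
  else
    let blk' := blk ++ [line]
    if pvIsFence line && decide (blk'.length > 1) then
      let res' :=
        if decide ((blk'.length : Int) > max_lines + 2) then
          res ++ [fence] ++ PySem.List.slice blk' (some 1) (some (max_lines + 1))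
              ++ ["# ... (truncated)", "```"]
        else res ++ blk'
      (res', false, [], fence)
    else (res, true, blk', fence)

def truncate_long_examples_py (body : String) (max_lines : Int) : String :=
  let lines := pvSplitNL body
  match lines.foldl (pvAStep max_lines) ([], false, [], "") with
  | (res, _, blk, _) => PySem.Str.join "\n" (if blk.isEmpty then res else res ++ blk)

-- ===== PORT B =====
-- inner scan: lines strictly before the first fence line, that closing line, and the rest
def pvFindClose : List String → Option (List String × String × List String)
  | [] => none
  | x :: xs =>
    if pvIsFence x then some ([], x, xs)
    else (pvFindClose xs).map (fun bcr => (x :: bcr.1, bcr.2.1, bcr.2.2))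

theorem pvFindClose_len : ∀ (ls b : List String) (c : String) (r : List String),
    pvFindClose ls = some (b, c, r) → r.length < ls.length := by
  intro ls
  induction ls with
  | nil => intro b c r h; simp [pvFindClose] at h
  | cons x xs ih =>
    intro b c r h
    simp only [pvFindClose] at h
    split at h
    · simp only [Option.some.injEq, Prod.mk.injEq] at h
      obtain ⟨-, -, h3⟩ := h; simp [← h3]
    · cases hfc : pvFindClose xs with
      | none => rw [hfc] at h; simp at h
      | some t =>
        obtain ⟨b', c', r'⟩ := t
        rw [hfc] at h
        simp only [Option.map_some, Option.some.injEq, Prod.mk.injEq] at h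
        obtain ⟨-, -, h3⟩ := h
        have := ih b' c' r' hfc
        simp [← h3]; omega

def pvBGo (max_lines : Int) : List String → List String
  | [] => []
  | l :: rest =>
    if pvIsFence l then
      match h : pvFindClose rest with
      | none => l :: rest
      | some (b, c, rest') =>
        let block := l :: (b ++ [c])
        (if decide ((block.length : Int) > max_lines + 2) then
           [l] ++ PySem.List.slice block (some 1) (some (max_lines + 1))
             ++ ["# ... (truncated)", "```"]
         else block) ++ pvBGo max_lines rest'
    else l :: pvBGo max_lines rest
termination_by ls => ls.length
decreasing_by
  · exact Nat.lt_succ_of_lt (pvFindClose_len rest b c rest' h)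
  · simp

def truncate_long_examples_py_alt (body : String) (max_lines : Int) : String :=
  PySem.Str.join "\n" (pvBGo max_lines (pvSplitNL body))

-- ===== PRECONDITION & SPEC =====
def Spec_truncate_long_examples_py (body : String) (max_lines : Int) (out : String) : Prop := out = truncate_long_examples_py_alt body max_lines
instance (body : String) (max_lines : Int) (out : String) : Decidable (Spec_truncate_long_examples_py body max_lines out) := by unfold Spec_truncate_long_examples_py; infer_instance

-- ===== CLAIM (what is proved, stated in full; the proofs are below) =====
def Claim_equal_truncate_long_examples_py : Prop := ∀ (body : String) (max_lines : Int), Dom_truncate_long_examples_py body max_lines → Spec_truncate_long_examples_py body max_lines (truncate_long_examples_py body max_lines)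

-- ===== LEMMAS AND PROOFS =====

-- A's final flush (res ++ blk) after folding from state st
def pvAFinish (max_lines : Int) (st : List String × Bool × List String × String)
    (ls : List String) : List String :=
  match ls.foldl (pvAStep max_lines) st with
  | (res, _, blk, _) => res ++ blk

-- what is emitted when a closed block bb (fence line first) is flushed
def pvEmit (max_lines : Int) (fence : String) (bb : List String) : List String :=
  if decide ((bb.length : Int) > max_lines + 2) then
    [fence] ++ PySem.List.slice bb (some 1) (some (max_lines + 1))
      ++ ["# ... (truncated)", "```"]
  else bb

theorem pvBGo_plain (m : Int) (l : String) (rest : List String) (hf : pvIsFence l = false) :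
    pvBGo m (l :: rest) = l :: pvBGo m rest := by
  rw [pvBGo]; simp [hf]

theorem pvBGo_unclosed (m : Int) (l : String) (rest : List String)
    (hf : pvIsFence l = true) (hfc : pvFindClose rest = none) :
    pvBGo m (l :: rest) = l :: rest := by
  rw [pvBGo]; simp only [hf, if_true]
  split
  · rfl
  · rename_i b c r h; rw [hfc] at h; exact absurd h (by simp)

theorem pvBGo_closed (m : Int) (l : String) (rest b : List String) (c : String)
    (r : List String) (hf : pvIsFence l = true) (hfc : pvFindClose rest = some (b, c, r)) :
    pvBGo m (l :: rest) = pvEmit m l (l :: (b ++ [c])) ++ pvBGo m r := by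
  rw [pvBGo]; simp only [hf, if_true]
  split
  · rename_i h; rw [hfc] at h; exact absurd h (by simp)
  · rename_i b' c' r' h
    rw [hfc] at h
    simp only [Option.some.injEq, Prod.mk.injEq] at h
    obtain ⟨h1, h2, h3⟩ := h
    subst h1; subst h2; subst h3
    simp [pvEmit]

theorem pv_main (max_lines : Int) : ∀ (n : Nat) (ls : List String), ls.length ≤ n →
    (∀ res f, pvAFinish max_lines (res, false, [], f) ls = res ++ pvBGo max_lines ls) ∧
    (∀ res blk f, blk ≠ [] →
      pvAFinish max_lines (res, true, blk, f) ls =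
        match pvFindClose ls with
        | none => res ++ blk ++ ls
        | some (b, c, r) =>
            res ++ pvEmit max_lines f (blk ++ b ++ [c]) ++ pvBGo max_lines r) := by
  intro n
  induction n with
  | zero =>
    intro ls hls
    have : ls = [] := List.eq_nil_of_length_eq_zero (Nat.le_zero.mp hls)
    subst this
    constructor
    · intro res f; simp [pvAFinish, pvBGo]
    · intro res blk f _; simp [pvAFinish, pvFindClose]
  | succ n ih =>
    intro ls hls
    cases ls with
    | nil =>
      constructor
      · intro res f; simp [pvAFinish, pvBGo]
      · intro res blk f _; simp [pvAFinish, pvFindClose]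
    | cons x xs =>
      have hxs : xs.length ≤ n := by simpa using Nat.lt_succ_iff.mp (Nat.lt_of_lt_of_le (by simp) hls)
      constructor
      · -- out of block
        intro res f
        by_cases hf : pvIsFence x
        · -- enter block with blk = [x], fence = x
          have hstep : pvAFinish max_lines (res, false, [], f) (x :: xs)
              = pvAFinish max_lines (res, true, [x], x) xs := by
            simp [pvAFinish, List.foldl_cons, pvAStep, hf]
          rw [hstep, (ih xs hxs).2 res [x] x (by simp)]
          cases hfc : pvFindClose xs with
          | none => rw [pvBGo_unclosed max_lines x xs hf hfc]; simp
          | some bcr =>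
            obtain ⟨b, c, r⟩ := bcr
            rw [pvBGo_closed max_lines x xs b c r hf hfc]
            simp [List.append_assoc]
        · have hstep : pvAFinish max_lines (res, false, [], f) (x :: xs)
              = pvAFinish max_lines (res ++ [x], false, [], f) xs := by
            simp [pvAFinish, List.foldl_cons, pvAStep, hf]
          rw [hstep, (ih xs hxs).1 (res ++ [x]) f, pvBGo_plain max_lines x xs (by simpa using hf)]
          simp
      · -- in block, blk ≠ []
        intro res blk f hblk
        by_cases hf : pvIsFence x
        · -- closing fence: blk' = blk ++ [x], length > 1
          have hlen : decide ((blk ++ [x]).length > 1) = true := by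
            simp; cases blk with | nil => exact absurd rfl hblk | cons a as => simp
          have hstate : pvAStep max_lines (res, true, blk, f) x
              = (res ++ pvEmit max_lines f (blk ++ [x]), false, [], f) := by
            simp only [pvAStep, hf, hlen, pvEmit, Bool.and_self, Bool.not_true, Bool.false_eq_true,
              if_false, if_true]
            split <;> simp
          have hstep : pvAFinish max_lines (res, true, blk, f) (x :: xs)
              = pvAFinish max_lines (res ++ pvEmit max_lines f (blk ++ [x]), false, [], f) xs := by
            simp [pvAFinish, List.foldl_cons, hstate]
          rw [hstep, (ih xs hxs).1 _ f]
          simp [pvFindClose, hf, List.append_assoc]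
        · have hstep : pvAFinish max_lines (res, true, blk, f) (x :: xs)
              = pvAFinish max_lines (res, true, blk ++ [x], f) xs := by
            simp [pvAFinish, List.foldl_cons, pvAStep, hf]
          rw [hstep, (ih xs hxs).2 res (blk ++ [x]) f (by simp)]
          cases hfc : pvFindClose xs with
          | none =>
            simp only [pvFindClose, hf, hfc]
            simp [List.append_assoc]
          | some bcr =>
            obtain ⟨b, c, r⟩ := bcr
            simp only [pvFindClose, hf, hfc]
            simp [List.append_assoc]

-- ===== VERDICT (by name: the statement is the Claim_ definition above) =====
theorem truncate_long_examples_py_spec : Claim_equal_truncate_long_examples_py := by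
  intro body max_lines _
  unfold Spec_truncate_long_examples_py truncate_long_examples_py truncate_long_examples_py_alt
  have h := (pv_main max_lines (pvSplitNL body).length (pvSplitNL body) le_rfl).1 [] ""
  unfold pvAFinish at h
  rcases hfold : (pvSplitNL body).foldl (pvAStep max_lines) ([], false, [], "") with ⟨res, inb, blk, fence⟩
  rw [hfold] at h
  simp only at h
  dsimp only
  rw [hfold]
  dsimp only
  have hflush : (if blk.isEmpty then res else res ++ blk) = res ++ blk := by
    cases blk <;> simp
  rw [hflush, h]
  simp
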